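-- pv_equiv track=rewrite | github.com/Advanced-AIgpt/Yandex-Full-Source | alice/boltalka/tools/sessions_parser/sessions_filterer/__main__.py | max_len_subseq_with_prefix
-- ===== SOURCE A (Python) =====
-- def max_len_subseq_with_prefix(values, prefix):
--     max_successive_prefixes = 0
--     current_max = 0
--     for v in values:
--         if v and v.startswith(prefix):
--             current_max += 1
--         else:
--             current_max = 0
--         max_successive_prefixes = max(max_successive_prefixes, current_max)
--     return max_successive_prefixes
-- ===== SOURCE B (Python) =====
-- from itertools import groupby
--
--
-- def max_len_subseq_with_prefix(values, prefix):
--     key = lambda v: bool(v and v.startswith(prefix))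
--     return max((sum(1 for _ in g) for k, g in groupby(map(key, values)) if k),
--                default=0)
-- ===== Notes on version B (the rewrite author's own statement) =====
-- stated objective: idiomatic
-- what changed: Replaced the running-counter-with-max single pass by itertools.groupby over the truthiness key, taking the max length of the True-keyed runs with default 0.
import Mathlib
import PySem

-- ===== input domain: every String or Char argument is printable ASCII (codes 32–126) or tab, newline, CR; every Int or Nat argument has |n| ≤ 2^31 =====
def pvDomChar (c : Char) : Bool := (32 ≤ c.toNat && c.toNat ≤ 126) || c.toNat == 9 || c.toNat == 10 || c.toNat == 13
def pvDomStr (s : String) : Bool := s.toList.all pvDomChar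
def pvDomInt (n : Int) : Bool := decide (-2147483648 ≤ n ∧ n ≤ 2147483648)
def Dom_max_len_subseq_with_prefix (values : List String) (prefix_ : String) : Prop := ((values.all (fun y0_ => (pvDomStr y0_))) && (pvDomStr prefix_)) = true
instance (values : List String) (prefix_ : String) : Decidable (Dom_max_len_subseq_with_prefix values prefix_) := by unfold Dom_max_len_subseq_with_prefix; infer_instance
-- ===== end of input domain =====

-- B replaces A's running-counter single pass by a group-consecutive-runs-then-take-max decomposition
-- (itertools.groupby in Python); same O(n) cost, more idiomatic ("alternative" decomposition).

-- ===== PORT A =====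
-- literal transliteration of A: one fold carrying (max_successive_prefixes, current_max)
def max_len_subseq_with_prefix (values : List String) (prefix_ : String) : Int :=
  (values.foldl
    (fun (st : Int × Int) v =>
      let current : Int := if (!(v == "")) && PySem.Str.startswith v prefix_ then st.2 + 1 else 0
      (max st.1 current, current))
    (0, 0)).1

-- ===== PORT B =====
-- Source B's key: bool(v and v.startswith(prefix))
def pvKey (prefix_ : String) (v : String) : Bool := (!(v == "")) && PySem.Str.startswith v prefix_

-- hand port of itertools.groupby on a list of keys (no key function): consecutive runs as (key, length)
def pvRuns : List Bool → List (Bool × Int)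
  | [] => []
  | b :: rest =>
      (b, 1 + ((rest.takeWhile (· == b)).length : Int)) :: pvRuns (rest.dropWhile (· == b))
termination_by l => l.length
decreasing_by
  simpa using Nat.lt_succ_of_le (List.length_dropWhile_le (· == b) rest)

-- max over the lengths of the True-keyed runs, default 0
def max_len_subseq_with_prefix_alt (values : List String) (prefix_ : String) : Int :=
  (((pvRuns (values.map (pvKey prefix_))).filter (·.1)).map (·.2)).foldl max 0

-- ===== PRECONDITION & SPEC =====
def Spec_max_len_subseq_with_prefix (values : List String) (prefix_ : String) (out : Int) : Prop := out = max_len_subseq_with_prefix_alt values prefix_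
instance (values : List String) (prefix_ : String) (out : Int) : Decidable (Spec_max_len_subseq_with_prefix values prefix_ out) := by unfold Spec_max_len_subseq_with_prefix; infer_instance

-- ===== CLAIM (what is proved, stated in full; the proofs are below) =====
def Claim_equal_max_len_subseq_with_prefix : Prop := ∀ (values : List String) (prefix_ : String), Dom_max_len_subseq_with_prefix values prefix_ → Spec_max_len_subseq_with_prefix values prefix_ (max_len_subseq_with_prefix values prefix_)

-- ===== LEMMAS AND PROOFS =====

-- reference function: best run, carry c = length of the current run
def pvFB : List Bool → Int → Int
  | [], _ => 0
  | true :: l, c => max (c + 1) (pvFB l (c + 1))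
  | false :: l, _ => pvFB l 0

theorem pvFB_nil (c : Int) : pvFB [] c = 0 := rfl
theorem pvFB_true_cons (l : List Bool) (c : Int) : pvFB (true :: l) c = max (c + 1) (pvFB l (c + 1)) := rfl
theorem pvFB_false_cons (l : List Bool) (c : Int) : pvFB (false :: l) c = pvFB l 0 := rfl

-- B's value of a list of flags
def pvMaxRuns (l : List Bool) : Int :=
  (((pvRuns l).filter (·.1)).map (·.2)).foldl max 0

theorem pvFoldA_eq (prefix_ : String) :
    ∀ (l : List String) (m c : Int), 0 ≤ m →
      (l.foldl
        (fun (st : Int × Int) v =>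
          let current : Int := if (!(v == "")) && PySem.Str.startswith v prefix_ then st.2 + 1 else 0
          (max st.1 current, current))
        (m, c)).1 = max m (pvFB (l.map (pvKey prefix_)) c) := by
  intro l
  induction l with
  | nil => intro m c hm; simp [pvFB_nil]; omega
  | cons v rest ih =>
      intro m c hm
      rcases hk : pvKey prefix_ v with _ | _
      · have hk' : ((!(v == "")) && PySem.Str.startswith v prefix_) = false := hk
        simp only [List.foldl_cons, List.map_cons, hk, hk', Bool.false_eq_true, if_false,
          pvFB_false_cons]
        rw [ih (max m 0) 0 (by omega)]
        omega
      · have hk' : ((!(v == "")) && PySem.Str.startswith v prefix_) = true := hk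
        simp only [List.foldl_cons, List.map_cons, hk, hk', if_true, pvFB_true_cons]
        rw [ih (max m (c + 1)) (c + 1) (by omega)]
        omega

theorem pvFoldl_max_pull : ∀ (xs : List Int) (a b : Int),
    xs.foldl max (max a b) = max a (xs.foldl max b) := by
  intro xs
  induction xs with
  | nil => intro a b; simp
  | cons x xs ih =>
      intro a b
      simp only [List.foldl_cons]
      rw [max_assoc, ih]

theorem pvFoldl_max_cons (x : Int) (xs : List Int) :
    (x :: xs).foldl max 0 = max x (xs.foldl max 0) := by
  simp only [List.foldl_cons]
  rw [max_comm (0 : Int) x, pvFoldl_max_pull]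

theorem pvFoldl_max_nonneg : ∀ (xs : List Int), 0 ≤ xs.foldl max 0 := by
  intro xs
  induction xs with
  | nil => simp
  | cons x xs ih => rw [pvFoldl_max_cons]; omega

theorem pvMaxRuns_nil : pvMaxRuns [] = 0 := by
  simp [pvMaxRuns, pvRuns]

theorem pvMaxRuns_false (rest : List Bool) :
    pvMaxRuns (false :: rest) = pvMaxRuns (rest.dropWhile (· == false)) := by
  simp [pvMaxRuns, pvRuns]

theorem pvMaxRuns_dropFalse : ∀ (l : List Bool),
    pvMaxRuns (l.dropWhile (· == false)) = pvMaxRuns l := by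
  intro l
  cases l with
  | nil => rfl
  | cons b rest =>
      cases b with
      | false => rw [List.dropWhile_cons_of_pos (by simp), pvMaxRuns_false]
      | true => rw [List.dropWhile_cons_of_neg (by simp)]

theorem pvMaxRuns_true (rest : List Bool) :
    pvMaxRuns (true :: rest) =
      max (1 + ((rest.takeWhile (· == true)).length : Int))
          (pvMaxRuns (rest.dropWhile (· == true))) := by
  unfold pvMaxRuns
  rw [pvRuns, List.filter_cons, if_pos (by rfl), List.map_cons, pvFoldl_max_cons]

theorem pvFB_true (l : List Bool) : ∀ (c : Int), 0 ≤ c →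
    pvFB (true :: l) c =
      max (c + 1 + ((l.takeWhile (· == true)).length : Int))
          (pvFB (l.dropWhile (· == true)) 0) := by
  induction l with
  | nil =>
      intro c hc
      simp only [pvFB_true_cons, pvFB_nil, List.takeWhile_nil, List.dropWhile_nil,
        List.length_nil]
      push_cast
      omega
  | cons b l' ih =>
      intro c hc
      cases b with
      | true =>
          rw [pvFB_true_cons, ih (c + 1) (by omega)]
          rw [List.takeWhile_cons_of_pos (by simp), List.dropWhile_cons_of_pos (by simp)]
          simp only [List.length_cons]
          push_cast
          omega
      | false =>
          rw [pvFB_true_cons, List.takeWhile_cons_of_neg (by simp),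
            List.dropWhile_cons_of_neg (by simp)]
          simp only [pvFB_false_cons, List.length_nil]
          push_cast
          omega

theorem pvFB_eq_maxRuns : ∀ (n : Nat) (l : List Bool), l.length ≤ n →
    pvFB l 0 = pvMaxRuns l := by
  intro n
  induction n with
  | zero =>
      intro l hl
      have h : l = [] := List.eq_nil_of_length_eq_zero (Nat.le_zero.mp hl)
      subst h; rw [pvFB_nil, pvMaxRuns_nil]
  | succ n ih =>
      intro l hl
      cases l with
      | nil => rw [pvFB_nil, pvMaxRuns_nil]
      | cons b rest =>
          cases b with
          | false =>
              simp only [List.length_cons] at hl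
              rw [pvFB_false_cons, ih rest (by omega), pvMaxRuns_false, pvMaxRuns_dropFalse]
          | true =>
              rw [pvFB_true rest 0 le_rfl, pvMaxRuns_true]
              have hlen : (rest.dropWhile (· == true)).length ≤ n := by
                have h2 := List.length_dropWhile_le (· == true) rest
                simp only [List.length_cons] at hl
                omega
              rw [ih _ hlen]
              simp

-- ===== VERDICT (by name: the statement is the Claim_ definition above) =====
theorem max_len_subseq_with_prefix_spec : Claim_equal_max_len_subseq_with_prefix := by
  intro values prefix_ _
  unfold Spec_max_len_subseq_with_prefix max_len_subseq_with_prefix max_len_subseq_with_prefix_alt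
  rw [pvFoldA_eq prefix_ values 0 0 le_rfl,
    pvFB_eq_maxRuns (values.map (pvKey prefix_)).length _ le_rfl]
  have h := pvFoldl_max_nonneg (((pvRuns (values.map (pvKey prefix_))).filter (·.1)).map (·.2))
  unfold pvMaxRuns
  omega
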